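-- pv_equiv track=rewrite | github.com/Evgen-rus/AudioExtractor | vosk_transcriber.py | format_vosk_result
-- ===== SOURCE A (Python) =====
-- def format_vosk_result(text):
--     """Форматирует результат распознавания Vosk для лучшей читаемости"""
--     # Заменяем множественные пробелы на один
--     text = ' '.join(text.split())
--
--     # Добавляем заголовок
--     formatted_text = "ТРАНСКРИПЦИЯ АУДИО (VOSK)\n\n"
--
--     # Настройки форматирования
--     max_line_length = 80
--     words = text.split()
--     current_line = []
--     current_length = 0
--     paragraphs = []
--     current_paragraph = []
--
--     # Разбиваем на строки
--     for word in words: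
--         word_length = len(word)
--
--         # Проверяем, поместится ли слово в текущую строку
--         if current_length + word_length + 1 <= max_line_length:
--             current_line.append(word)
--             current_length += word_length + 1
--         else:
--             # Добавляем готовую строку в текущий параграф
--             if current_line:
--                 current_paragraph.append(' '.join(current_line))
--
--             # Начинаем новую строку
--             current_line = [word]
--             current_length = word_length
--
--             # Если параграф достаточно большой, начинаем новый
--             if len(current_paragraph) >= 4:  # количество строк в параграфе
--                 paragraphs.append('\n'.join(current_paragraph))
--                 current_paragraph = []
--
--     # Добавляем последнюю строку и параграф
--     if current_line:
--         current_paragraph.append(' '.join(current_line))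
--     if current_paragraph:
--         paragraphs.append('\n'.join(current_paragraph))
--
--     # Собираем финальный текст
--     formatted_text += '\n\n'.join(paragraphs)
--
--     # Добавляем статистику
--     formatted_text += f"\n\nСтатистика:\n"
--     formatted_text += f"Количество слов: {len(words)}\n"
--     formatted_text += f"Количество символов: {len(text)}\n"
--
--     return formatted_text
-- ===== SOURCE B (Python) =====
-- def _wrap_lines(words):
--     lines = []
--     line = []
--     length = 0
--     for word in words:
--         if length + len(word) + 1 <= 80:
--             line.append(word)
--             length += len(word) + 1
--         else:
--             if line:
--                 lines.append(' '.join(line))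
--             line = [word]
--             length = len(word)
--     if line:
--         lines.append(' '.join(line))
--     return lines
--
--
-- def format_vosk_result(text):
--     """Форматирует результат распознавания Vosk для лучшей читаемости"""
--     text = ' '.join(text.split())
--     words = text.split()
--     lines = _wrap_lines(words)
--     paragraphs = ['\n'.join(lines[i:i + 4]) for i in range(0, len(lines), 4)]
--     return (
--         "ТРАНСКРИПЦИЯ АУДИО (VOSK)\n\n"
--         + '\n\n'.join(paragraphs)
--         + "\n\nСтатистика:\n"
--         + f"Количество слов: {len(words)}\n"
--         + f"Количество символов: {len(text)}\n"
--     )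
-- ===== Notes on version B (the rewrite author's own statement) =====
-- stated objective: alternative
-- what changed: A builds paragraphs interleaved with the wrapping loop (tracking current_paragraph and flushing at 4 lines inside the word loop); B first greedily wraps words into a flat list of lines, then slices that list into chunks of 4 in a separate recursive pass.
import Mathlib
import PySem

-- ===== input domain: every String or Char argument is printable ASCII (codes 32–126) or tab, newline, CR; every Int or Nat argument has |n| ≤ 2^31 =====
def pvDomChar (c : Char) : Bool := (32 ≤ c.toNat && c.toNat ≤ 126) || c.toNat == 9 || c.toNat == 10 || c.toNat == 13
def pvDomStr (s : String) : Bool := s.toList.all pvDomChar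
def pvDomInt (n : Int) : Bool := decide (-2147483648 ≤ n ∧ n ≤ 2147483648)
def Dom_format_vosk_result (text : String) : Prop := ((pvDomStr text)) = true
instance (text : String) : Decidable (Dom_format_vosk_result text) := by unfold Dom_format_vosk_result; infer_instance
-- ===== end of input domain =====

-- B replaces A's interleaved wrap-and-paragraph loop by a flat wrapping pass followed by a
-- separate chunks-of-4 pass (alternative decomposition, same cost).

-- ===== PORT A =====
-- loop body; state: (paragraphs, current_paragraph, current_line, current_length)
def fvrStepA (st : List String × List String × List String × Int) (word : String) :
    List String × List String × List String × Int :=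
  let wl : Int := PySem.Str.len word
  if st.2.2.2 + wl + 1 ≤ 80 then
    (st.1, st.2.1, st.2.2.1 ++ [word], st.2.2.2 + wl + 1)
  else
    let curpar := if st.2.2.1.isEmpty then st.2.1 else st.2.1 ++ [PySem.Str.join " " st.2.2.1]
    if 4 ≤ curpar.length then
      (st.1 ++ [PySem.Str.join "\n" curpar], [], [word], wl)
    else
      (st.1, curpar, [word], wl)

-- the two flushes after the loop ("Добавляем последнюю строку и параграф")
def fvrFinalA (st : List String × List String × List String × Int) : List String :=
  let curpar := if st.2.2.1.isEmpty then st.2.1 else st.2.1 ++ [PySem.Str.join " " st.2.2.1]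
  if curpar.isEmpty then st.1 else st.1 ++ [PySem.Str.join "\n" curpar]

-- the += concatenations of A, as one ""-join
def fvrAssembleA (pars : List String) (nWords nChars : Int) : String :=
  PySem.Str.join "" ["ТРАНСКРИПЦИЯ АУДИО (VOSK)\n\n", PySem.Str.join "\n\n" pars,
    "\n\nСтатистика:\n", "Количество слов: ", PySem.Int.toStr nWords, "\n",
    "Количество символов: ", PySem.Int.toStr nChars, "\n"]

def format_vosk_result (text : String) : String :=
  let text2 := PySem.Str.join " " (PySem.Str.split₀ text)
  let words := PySem.Str.split₀ text2
  fvrAssembleA (fvrFinalA (words.foldl fvrStepA ([], [], [], 0)))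
    (words.length : Int) (PySem.Str.len text2)

-- ===== PORT B =====
-- _wrap_lines loop body; state: (lines, line, length)
def fvrStepB (st : List String × List String × Int) (word : String) :
    List String × List String × Int :=
  let wl : Int := PySem.Str.len word
  if st.2.2 + wl + 1 ≤ 80 then
    (st.1, st.2.1 ++ [word], st.2.2 + wl + 1)
  else
    (if st.2.1.isEmpty then st.1 else st.1 ++ [PySem.Str.join " " st.2.1], [word], wl)

def fvrWrap (words : List String) : List String :=
  let st := words.foldl fvrStepB ([], [], 0)
  if st.2.1.isEmpty then st.1 else st.1 ++ [PySem.Str.join " " st.2.1]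

-- B's single return expression
def fvrAssembleB (pars : List String) (nWords nChars : Int) : String :=
  PySem.Str.join "" ["ТРАНСКРИПЦИЯ АУДИО (VOSK)\n\n", PySem.Str.join "\n\n" pars,
    "\n\nСтатистика:\n", "Количество слов: ", PySem.Int.toStr nWords, "\n",
    "Количество символов: ", PySem.Int.toStr nChars, "\n"]

def format_vosk_result_alt (text : String) : String :=
  let text2 := PySem.Str.join " " (PySem.Str.split₀ text)
  let words := PySem.Str.split₀ text2
  -- ['\n'.join(lines[i:i + 4]) for i in range(0, len(lines), 4)]
  let lines := fvrWrap words
  fvrAssembleB ((PySem.List.pyRange 0 (PySem.List.len lines) 4).map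
      (fun i => PySem.Str.join "\n" (PySem.List.slice lines (some i) (some (i + 4)))))
    (words.length : Int) (PySem.Str.len text2)

-- ===== PRECONDITION & SPEC =====
def Spec_format_vosk_result (text : String) (out : String) : Prop := out = format_vosk_result_alt text
instance (text : String) (out : String) : Decidable (Spec_format_vosk_result text out) := by unfold Spec_format_vosk_result; infer_instance

-- ===== CLAIM (what is proved, stated in full; the proofs are below) =====
def Claim_equal_format_vosk_result : Prop := ∀ (text : String), Dom_format_vosk_result text → Spec_format_vosk_result text (format_vosk_result text)

-- ===== LEMMAS AND PROOFS =====

-- Ghost fold: A's state with the paragraphs kept un-joined (List (List String)).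
def fvrStepG (st : List (List String) × List String × List String × Int) (word : String) :
    List (List String) × List String × List String × Int :=
  let wl : Int := PySem.Str.len word
  if st.2.2.2 + wl + 1 ≤ 80 then
    (st.1, st.2.1, st.2.2.1 ++ [word], st.2.2.2 + wl + 1)
  else
    let rem := if st.2.2.1.isEmpty then st.2.1 else st.2.1 ++ [PySem.Str.join " " st.2.2.1]
    if 4 ≤ rem.length then (st.1 ++ [rem], [], [word], wl)
    else (st.1, rem, [word], wl)

lemma foldA_eq_ghost (ws : List String) :
    ∀ (done : List (List String)) (rem line : List String) (len : Int),
    ws.foldl fvrStepA (done.map (PySem.Str.join "\n"), rem, line, len) =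
      (let g := ws.foldl fvrStepG (done, rem, line, len)
       (g.1.map (PySem.Str.join "\n"), g.2.1, g.2.2.1, g.2.2.2)) := by
  induction ws with
  | nil => intro done rem line len; simp
  | cons w ws ih =>
    intro done rem line len
    simp only [List.foldl_cons]
    have hstep : fvrStepA (done.map (PySem.Str.join "\n"), rem, line, len) w =
        (let g := fvrStepG (done, rem, line, len) w
         (g.1.map (PySem.Str.join "\n"), g.2.1, g.2.2.1, g.2.2.2)) := by
      simp only [fvrStepA, fvrStepG]
      split_ifs <;> simp
    rw [hstep]
    exact ih _ _ _ _

lemma foldB_eq_ghost (ws : List String) :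
    ∀ (done : List (List String)) (rem line : List String) (len : Int),
    ws.foldl fvrStepB (done.flatten ++ rem, line, len) =
      (let g := ws.foldl fvrStepG (done, rem, line, len)
       (g.1.flatten ++ g.2.1, g.2.2.1, g.2.2.2)) := by
  induction ws with
  | nil => intro done rem line len; simp
  | cons w ws ih =>
    intro done rem line len
    simp only [List.foldl_cons]
    have hstep : fvrStepB (done.flatten ++ rem, line, len) w =
        (let g := fvrStepG (done, rem, line, len) w
         (g.1.flatten ++ g.2.1, g.2.2.1, g.2.2.2)) := by
      simp only [fvrStepB, fvrStepG]
      split_ifs <;> simp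
    rw [hstep]
    exact ih _ _ _ _

lemma ghost_inv (ws : List String) :
    ∀ (done : List (List String)) (rem line : List String) (len : Int),
    (∀ d ∈ done, d.length = 4) → rem.length < 4 →
    (∀ d ∈ (ws.foldl fvrStepG (done, rem, line, len)).1, d.length = 4) ∧
      (ws.foldl fvrStepG (done, rem, line, len)).2.1.length < 4 := by
  induction ws with
  | nil => intro done rem line len hd hr; exact ⟨hd, hr⟩
  | cons w ws ih =>
    intro done rem line len hd hr
    simp only [List.foldl_cons, fvrStepG]
    split_ifs with h1 h2 h3 h4
    · exact ih _ _ _ _ hd hr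
    · exact absurd h3 (by simp at hr ⊢; omega)
    · exact ih _ _ _ _ hd hr
    · refine ih _ _ _ _ ?_ (by simp)
      intro d hdm
      rcases List.mem_append.1 hdm with h | h
      · exact hd d h
      · simp only [List.mem_singleton] at h
        subst h
        simp at h4 ⊢
        omega
    · refine ih _ _ _ _ hd (by simp at h4 ⊢; omega)

lemma slice_quad (l : List String) (a : Int) (h : 0 ≤ a) :
    PySem.List.slice l (some a) (some (a + 4)) = (l.drop a.toNat).take 4 := by
  simp only [PySem.List.slice, PySem.List.clampIdx]
  have h1 : ¬ a < 0 := by omega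
  have h2 : ¬ a + 4 < 0 := by omega
  simp only [h1, h2, if_false]
  by_cases hc : a.toNat ≤ l.length
  · have hmin : min a.toNat l.length = a.toNat := by omega
    rw [hmin]
    by_cases hc2 : (a + 4).toNat ≤ l.length
    · have hm : min (a + 4).toNat l.length = (a + 4).toNat := by omega
      rw [hm]
      have h4 : (a + 4).toNat - a.toNat = 4 := by omega
      rw [h4]
    · have hm : min (a + 4).toNat l.length = l.length := by omega
      rw [hm]
      have hlen : (l.drop a.toNat).length = l.length - a.toNat := by simp
      rw [List.take_of_length_le (by omega), List.take_of_length_le (by omega)]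
  · have hmin : min a.toNat l.length = l.length := by omega
    have hmin2 : min (a + 4).toNat l.length = l.length := by omega
    rw [hmin, hmin2]
    have hnil : l.drop a.toNat = [] := List.drop_eq_nil_of_le (by omega)
    simp [hnil]

-- B's index comprehension, rewritten to Nat indices into drop/take form
lemma slice_range_form (l : List String) :
    (PySem.List.pyRange 0 (PySem.List.len l) 4).map
        (fun i => PySem.Str.join "\n" (PySem.List.slice l (some i) (some (i + 4)))) =
      (List.range ((l.length + 3) / 4)).map
        (fun k => PySem.Str.join "\n" ((l.drop (4 * k)).take 4)) := by
  rw [PySem.List.pyRange_of_pos 0 (PySem.List.len l) (by norm_num), List.map_map]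
  have hcount : (if (0:Int) < PySem.List.len l
      then (((PySem.List.len l) - 0 + 4 - 1) / 4).toNat else 0) = (l.length + 3) / 4 := by
    simp only [PySem.List.len_eq]
    split_ifs with h
    · rw [show ((l.length:Int) - 0 + 4 - 1) = ((l.length + 3 : Nat) : Int) by push_cast; ring,
          show (4:Int) = ((4:Nat):Int) by norm_num, ← Int.natCast_ediv, Int.toNat_natCast]
    · have h0 : l.length = 0 := by omega
      simp [h0]
  rw [hcount]
  refine List.map_congr_left ?_
  intro k _
  simp only [Function.comp]
  rw [slice_quad l (0 + 4 * (k : Int)) (by positivity),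
      show (0 + 4 * (k : Int)).toNat = 4 * k by omega]

lemma chunks_flatten (done : List (List String)) :
    ∀ (rem : List String), (∀ d ∈ done, d.length = 4) → rem.length ≤ 4 →
    (List.range (((done.flatten ++ rem).length + 3) / 4)).map
        (fun k => PySem.Str.join "\n" (((done.flatten ++ rem).drop (4 * k)).take 4)) =
      done.map (PySem.Str.join "\n") ++
        (if rem.isEmpty then [] else [PySem.Str.join "\n" rem]) := by
  induction done with
  | nil =>
    intro rem _ hr
    cases rem with
    | nil => simp
    | cons x xs =>
      have hL : (((x :: xs).length + 3) / 4) = 1 := by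
        simp only [List.length_cons] at hr ⊢
        omega
      simp only [List.flatten_nil, List.nil_append, hL]
      have htk : (x :: xs).take 4 = x :: xs := List.take_of_length_le (by simpa using hr)
      simp [List.range_succ, htk]
  | cons d done ih =>
    intro rem hd hr
    have hd4 : d.length = 4 := hd d (by simp)
    have hlen : ((d :: done).flatten ++ rem).length = 4 + (done.flatten ++ rem).length := by
      simp [hd4]
    have hq : (((d :: done).flatten ++ rem).length + 3) / 4
        = ((done.flatten ++ rem).length + 3) / 4 + 1 := by
      rw [hlen]; omega
    rw [hq, List.range_succ_eq_map, List.map_cons, List.map_map]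
    have hflat : (d :: done).flatten ++ rem = d ++ (done.flatten ++ rem) := by
      simp
    have hhead : PySem.Str.join "\n" ((((d :: done).flatten ++ rem).drop (4 * 0)).take 4)
        = PySem.Str.join "\n" d := by
      rw [hflat]
      simp only [Nat.mul_zero, List.drop_zero]
      rw [← hd4, List.take_left]
    have htail : ∀ (k : Nat),
        (((d :: done).flatten ++ rem).drop (4 * (k + 1))).take 4
          = ((done.flatten ++ rem).drop (4 * k)).take 4 := by
      intro k
      rw [hflat]
      have h1 : 4 * (k + 1) = d.length + 4 * k := by omega
      rw [h1, List.drop_append, List.drop_eq_nil_of_le (by omega), List.nil_append,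
          show d.length + 4 * k - d.length = 4 * k by omega]
    rw [hhead]
    have hmap : (List.range (((done.flatten ++ rem).length + 3) / 4)).map
          ((fun k => PySem.Str.join "\n" ((((d :: done).flatten ++ rem).drop (4 * k)).take 4)) ∘ Nat.succ)
        = (List.range (((done.flatten ++ rem).length + 3) / 4)).map
          (fun k => PySem.Str.join "\n" (((done.flatten ++ rem).drop (4 * k)).take 4)) := by
      refine List.map_congr_left ?_
      intro k _
      simp only [Function.comp, Nat.succ_eq_add_one]
      rw [htail k]
    rw [hmap, ih rem (fun x hx => hd x (by simp [hx])) hr]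
    simp

-- the paragraph lists of the two ports agree
lemma pars_eq (ws : List String) :
    fvrFinalA (ws.foldl fvrStepA ([], [], [], 0)) =
      (PySem.List.pyRange 0 (PySem.List.len (fvrWrap ws)) 4).map
        (fun i => PySem.Str.join "\n" (PySem.List.slice (fvrWrap ws) (some i) (some (i + 4)))) := by
  have hA := foldA_eq_ghost ws [] [] [] 0
  have hB := foldB_eq_ghost ws [] [] [] 0
  simp only [List.map_nil, List.flatten_nil, List.nil_append] at hA hB
  obtain ⟨hd4, hrlt⟩ := ghost_inv ws [] [] [] 0 (by simp) (by simp)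
  set g := ws.foldl fvrStepG ([], [], [], 0) with hg
  set rem' := if g.2.2.1.isEmpty then g.2.1 else g.2.1 ++ [PySem.Str.join " " g.2.2.1] with hrem'
  have hr4 : rem'.length ≤ 4 := by
    rw [hrem']; split_ifs
    · omega
    · simp; omega
  have hlines : fvrWrap ws = g.1.flatten ++ rem' := by
    rw [fvrWrap, hB]
    simp only [hrem']
    split_ifs <;> simp [List.append_assoc]
  rw [hlines, slice_range_form, chunks_flatten g.1 rem' hd4 hr4, fvrFinalA, hA]
  simp only [← hrem']
  by_cases h : rem'.isEmpty
  · simp [h]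
  · simp [h]

-- ===== VERDICT (by name: the statement is the Claim_ definition above) =====
theorem format_vosk_result_spec : Claim_equal_format_vosk_result := by
  intro text _
  unfold Spec_format_vosk_result format_vosk_result format_vosk_result_alt fvrAssembleA fvrAssembleB
  simp only [pars_eq]
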